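-- pv_equiv track=rewrite | github.com/trice/ddocdpyproto | library/ddocdspend.py | get_ability_range
-- ===== SOURCE A (Python) =====
-- def get_ability_range(points_available):
--     '''
--     get_ability_range will take the amount of points that are available
--     and calculate an ability range to use. The trick is to just figure
--     out how far this method should index into the build_points array
--     '''
--     build_points = [1, 1, 1, 1, 1, 1, 2, 2, 3, 3]
--
--     ability_range = []
--     if points_available == 0:
--         return [8]
--
--     # 16 is the most points you can spend on an ability
--     max_points = 16
--
--     points_max = points_available
--     if points_available >= max_points:
--         points_max = max_points
--
--     points_spent = 0
--     index = 0
--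
--     while points_spent <= points_max:
--         ability_range.append(8 + index)
--         if index == 10:
--             break
--         points_spent += build_points[index]
--         index += 1
--
--     return ability_range
-- ===== SOURCE B (Python) =====
-- def get_ability_range(points_available):
--     # Cumulative cost of raising the ability score i steps above 8:
--     # prefix sums of [1,1,1,1,1,1,2,2,3,3].
--     prefix = [0, 1, 2, 3, 4, 5, 6, 8, 10, 13, 16]
--     points_max = min(points_available, 16)
--     count = sum(1 for cost in prefix if cost <= points_max)
--     return [8 + i for i in range(count)]
-- ===== Notes on version B (the rewrite author's own statement) =====
-- stated objective: simpler
-- what changed: Replaces the accumulate-and-append while loop (and the redundant points_available==0 special case) with a precomputed cumulative-cost prefix table: the answer is just [8+i] for each prefix entry not exceeding min(points_available,16).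
import Mathlib
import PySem

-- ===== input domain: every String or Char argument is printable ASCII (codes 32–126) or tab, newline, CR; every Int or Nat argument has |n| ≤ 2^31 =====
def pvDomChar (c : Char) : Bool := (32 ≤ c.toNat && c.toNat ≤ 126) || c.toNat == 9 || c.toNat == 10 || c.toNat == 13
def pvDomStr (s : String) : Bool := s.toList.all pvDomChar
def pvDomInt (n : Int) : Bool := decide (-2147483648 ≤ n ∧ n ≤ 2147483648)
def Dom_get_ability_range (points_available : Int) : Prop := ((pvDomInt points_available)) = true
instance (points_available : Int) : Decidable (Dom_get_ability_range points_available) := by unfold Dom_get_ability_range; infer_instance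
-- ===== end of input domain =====

-- B replaces A's accumulate-and-append while loop (and its points_available==0 special case)
-- with a precomputed prefix-sum cost table and a closed-form cutoff; objective: simpler.

-- ===== PORT A =====
-- the while loop: fuel is a transliteration device only (the loop runs at most 11 iterations,
-- the top call supplies fuel 11, so the fuel-0 branch is unreachable).
-- build_points[index] is accessed only with index < 10 (the break fires at 10), so getD 0 is exact.
def abilityLoopA : Nat → Int → Int → Nat → List Int → List Int
  | 0, _, _, _, acc => acc
  | fuel + 1, points_max, points_spent, index, acc =>
    if points_spent ≤ points_max then
      let acc' := acc ++ [8 + (index : Int)]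
      if index = 10 then acc'
      else abilityLoopA fuel points_max
        (points_spent + (([1, 1, 1, 1, 1, 1, 2, 2, 3, 3] : List Int).getD index 0))
        (index + 1) acc'
    else acc

def get_ability_range (points_available : Int) : List Int :=
  if points_available = 0 then [8]
  else
    let points_max := if points_available ≥ 16 then 16 else points_available
    abilityLoopA 11 points_max 0 0 []

-- ===== PORT B =====
-- min(points_available, 16) ported as its definition (if-then-else) so the kernel can evaluate it
def get_ability_range_alt (points_available : Int) : List Int :=
  let pre : List Int := [0, 1, 2, 3, 4, 5, 6, 8, 10, 13, 16]
  let points_max := if points_available ≤ 16 then points_available else 16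
  let count := pre.countP (fun cost => cost ≤ points_max)
  (List.range count).map (fun i : Nat => (8 : Int) + (i : Int))

-- ===== PRECONDITION & SPEC =====
def Spec_get_ability_range (points_available : Int) (out : List Int) : Prop := out = get_ability_range_alt points_available
instance (points_available : Int) (out : List Int) : Decidable (Spec_get_ability_range points_available out) := by unfold Spec_get_ability_range; infer_instance

-- ===== CLAIM (what is proved, stated in full; the proofs are below) =====
def Claim_equal_get_ability_range : Prop := ∀ (points_available : Int), Dom_get_ability_range points_available → Spec_get_ability_range points_available (get_ability_range points_available)

-- ===== LEMMAS AND PROOFS =====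

-- For p ≥ 16 both programs compute with points_max = 16, i.e. the value at input 16.
theorem portA_high (p : Int) (h : 16 ≤ p) : get_ability_range p = get_ability_range 16 := by
  unfold get_ability_range
  rw [if_neg (by omega), if_neg (by omega : ¬ (16:Int) = 0), if_pos h, if_pos (by omega)]

theorem portB_high (p : Int) (h : 16 ≤ p) : get_ability_range_alt p = get_ability_range_alt 16 := by
  unfold get_ability_range_alt
  by_cases h16 : p ≤ 16
  · rw [if_pos h16, show p = (16:Int) by omega]; norm_num
  · rw [if_neg h16, if_pos (by omega : (16:Int) ≤ 16)]

theorem portA_neg (p : Int) (h : p < 0) : get_ability_range p = [] := by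
  unfold get_ability_range abilityLoopA
  rw [if_neg (by omega : ¬ p = 0), if_neg (by omega : ¬ p ≥ 16),
    if_neg (by omega : ¬ (0:Int) ≤ p)]

theorem portB_neg (p : Int) (h : p < 0) : get_ability_range_alt p = [] := by
  have hc : ([0, 1, 2, 3, 4, 5, 6, 8, 10, 13, 16] : List Int).countP (fun cost => cost ≤ p) = 0 := by
    rw [List.countP_eq_zero]
    intro a ha
    simp only [List.mem_cons, List.not_mem_nil, or_false] at ha
    simp only [decide_eq_true_eq]
    rcases ha with rfl|rfl|rfl|rfl|rfl|rfl|rfl|rfl|rfl|rfl|rfl <;> omega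
  show (List.range (([0, 1, 2, 3, 4, 5, 6, 8, 10, 13, 16] : List Int).countP
      (fun cost => cost ≤ if p ≤ 16 then p else 16))).map (fun i : Nat => (8 : Int) + (i : Int)) = []
  rw [if_pos (by omega : p ≤ 16), hc]
  rfl

-- ===== VERDICT (by name: the statement is the Claim_ definition above) =====
theorem get_ability_range_spec : Claim_equal_get_ability_range := by
  intro p _
  unfold Spec_get_ability_range
  rcases lt_trichotomy p 0 with h | h | h
  · rw [portA_neg p h, portB_neg p h]
  · subst h; decide
  · by_cases h16 : 16 ≤ p
    · rw [portA_high p h16, portB_high p h16]; decide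
    · interval_cases p <;> decide
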